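-- pv_equiv track=rewrite | github.com/liviusi/UniPi-Informatica | RO/PLI/zaino.py | ammissibile
-- ===== SOURCE A (Python) =====
-- def ammissibile(indici, locked, peso, C):
-- 	c = C
-- 	for i in range(0, len(locked)):
-- 		if (locked[indici[i] - 1] == 1):
-- 			c -= peso[indici[i] - 1]
-- 		if c <= 0:
-- 			return False
-- 	return True
-- ===== SOURCE B (Python) =====
-- def _run(indici, locked, peso, c, lo, hi):
--     # process positions [lo, hi); return remaining capacity if every prefix
--     # check passes, otherwise None (infeasible)
--     if hi <= lo:
--         return c
--     if hi == lo + 1: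
--         j = indici[lo] - 1
--         c2 = c - peso[j] if locked[j] == 1 else c
--         return c2 if c2 > 0 else None
--
--     mid = (lo + hi) // 2
--     left = _run(indici, locked, peso, c, lo, mid)
--     if left is None:
--         return None
--     return _run(indici, locked, peso, left, mid, hi)
--
-- def ammissibile(indici, locked, peso, C):
--     return _run(indici, locked, peso, C, 0, len(locked)) is not None
-- ===== Notes on version B (the rewrite author's own statement) =====
-- stated objective: alternative
-- what changed: Replaces A's linear early-exit loop carrying a mutable capacity by a divide-and-conquer recursion over the index range that threads the remaining capacity as an Optional (None = some prefix exhausted it), combining halves left-then-right.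
import Mathlib
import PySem

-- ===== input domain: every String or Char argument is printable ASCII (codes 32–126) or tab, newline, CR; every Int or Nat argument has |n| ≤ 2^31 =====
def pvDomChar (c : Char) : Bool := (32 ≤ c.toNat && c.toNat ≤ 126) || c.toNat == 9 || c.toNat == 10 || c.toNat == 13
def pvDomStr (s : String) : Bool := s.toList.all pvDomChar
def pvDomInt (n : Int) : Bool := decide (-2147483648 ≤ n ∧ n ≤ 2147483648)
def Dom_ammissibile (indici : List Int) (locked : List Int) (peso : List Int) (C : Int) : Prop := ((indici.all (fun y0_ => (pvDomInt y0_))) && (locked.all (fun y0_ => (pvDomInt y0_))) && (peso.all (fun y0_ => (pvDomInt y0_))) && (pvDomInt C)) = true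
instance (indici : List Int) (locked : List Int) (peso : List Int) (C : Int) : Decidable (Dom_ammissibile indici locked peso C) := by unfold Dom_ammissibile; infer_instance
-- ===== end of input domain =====

-- B replaces A's linear early-exit loop by a divide-and-conquer over the index range that
-- threads the remaining capacity as an Option (None = some prefix exhausted the capacity);
-- objective: alternative, not faster.

-- ===== PORT A =====
-- A's for-loop with early 'return False', as structural recursion over range(0, len(locked))
-- carrying the running capacity c.
def ammLoopA (indici locked peso : List Int) (c : Int) : List Nat → Bool
  | [] => true
  | i :: rest =>
    let j := PySem.List.pyGetD indici (i : Int) 0 - 1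
    let c' := if PySem.List.pyGetD locked j 0 == 1 then c - PySem.List.pyGetD peso j 0 else c
    if c' ≤ 0 then false else ammLoopA indici locked peso c' rest

def ammissibile (indici : List Int) (locked : List Int) (peso : List Int) (C : Int) : Bool :=
  ammLoopA indici locked peso C (List.range locked.length)

-- ===== PORT B =====
-- Source B's _run: process positions [lo, hi) by splitting at mid = (lo+hi)//2; returns the
-- remaining capacity (some c) if every prefix check passes, none otherwise.
def ammRun (indici locked peso : List Int) (c : Int) (lo hi : Nat) : Option Int :=
  if hi ≤ lo then some c
  else if hi = lo + 1 then
    let j := PySem.List.pyGetD indici (lo : Int) 0 - 1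
    let c2 := if PySem.List.pyGetD locked j 0 == 1 then c - PySem.List.pyGetD peso j 0 else c
    if c2 > 0 then some c2 else none
  else
    match ammRun indici locked peso c lo ((lo + hi) / 2) with
    | none => none
    | some c' => ammRun indici locked peso c' ((lo + hi) / 2) hi
termination_by hi - lo
decreasing_by all_goals omega

def ammissibile_alt (indici : List Int) (locked : List Int) (peso : List Int) (C : Int) : Bool :=
  (ammRun indici locked peso C 0 locked.length).isSome

-- ===== PRECONDITION & SPEC =====
-- position k's index accesses are in range (Python negative-index wraparound included)
def pvOk (indici locked peso : List Int) (k : Nat) : Bool :=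
  decide (PySem.Raise.InRange indici.length (k : Int)) &&
  decide (PySem.Raise.InRange locked.length (PySem.List.pyGetD indici (k : Int) 0 - 1)) &&
  (!(PySem.List.pyGetD locked (PySem.List.pyGetD indici (k : Int) 0 - 1) 0 == 1) ||
    decide (PySem.Raise.InRange peso.length (PySem.List.pyGetD indici (k : Int) 0 - 1)))

-- the contribution subtracted from the capacity at position k
def pvContrib (indici locked peso : List Int) (k : Nat) : Int :=
  let j := PySem.List.pyGetD indici (k : Int) 0 - 1
  if PySem.List.pyGetD locked j 0 == 1 then PySem.List.pyGetD peso j 0 else 0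

-- Pre_ excludes exactly the inputs on which the Python A raises IndexError: its loop reaches
-- a position (all earlier accesses in range and all earlier running capacities positive)
-- whose index access is out of range; B raises there too, at the same position.
def Pre_ammissibile (indici : List Int) (locked : List Int) (peso : List Int) (C : Int) : Prop :=
  ∀ i ∈ List.range locked.length,
    ((∀ k < i, pvOk indici locked peso k = true) ∧
     (∀ k < i, C - ((List.range (k+1)).map (pvContrib indici locked peso)).sum > 0)) →
    pvOk indici locked peso i = true
instance (indici : List Int) (locked : List Int) (peso : List Int) (C : Int) : Decidable (Pre_ammissibile indici locked peso C) := by unfold Pre_ammissibile; infer_instance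
def pvWitness_ammissibile : List Int × List Int × List Int × Int := ([1, 2], [1, 0], [2, 3], 5)

def Spec_ammissibile (indici : List Int) (locked : List Int) (peso : List Int) (C : Int) (out : Bool) : Prop := out = ammissibile_alt indici locked peso C
instance (indici : List Int) (locked : List Int) (peso : List Int) (C : Int) (out : Bool) : Decidable (Spec_ammissibile indici locked peso C out) := by unfold Spec_ammissibile; infer_instance

-- ===== CLAIM (what is proved, stated in full; the proofs are below) =====
def Claim_equal_ammissibile : Prop := ∀ (indici : List Int) (locked : List Int) (peso : List Int) (C : Int), Dom_ammissibile indici locked peso C → Pre_ammissibile indici locked peso C → Spec_ammissibile indici locked peso C (ammissibile indici locked peso C)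

-- ===== LEMMAS AND PROOFS =====

-- sequential reference run over an explicit list of positions
def seqRun (indici locked peso : List Int) (c : Int) : List Nat → Option Int
  | [] => some c
  | i :: rest =>
    let j := PySem.List.pyGetD indici (i : Int) 0 - 1
    let c2 := if PySem.List.pyGetD locked j 0 == 1 then c - PySem.List.pyGetD peso j 0 else c
    if c2 > 0 then seqRun indici locked peso c2 rest else none

theorem seqRun_append (indici locked peso : List Int) (xs ys : List Nat) (c : Int) :
    seqRun indici locked peso c (xs ++ ys)
      = (seqRun indici locked peso c xs).bind (fun c' => seqRun indici locked peso c' ys) := by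
  induction xs generalizing c with
  | nil => rfl
  | cons x xs ih =>
    simp only [List.cons_append, seqRun]
    generalize (if PySem.List.pyGetD locked (PySem.List.pyGetD indici (x : Int) 0 - 1) 0 == 1
        then c - PySem.List.pyGetD peso (PySem.List.pyGetD indici (x : Int) 0 - 1) 0 else c) = c2
    by_cases h : c2 > 0
    · rw [if_pos h, if_pos h]
      exact ih _
    · rw [if_neg h, if_neg h]
      rfl

theorem ammRun_eq_seq (indici locked peso : List Int) (n : Nat) :
    ∀ lo hi c, hi - lo = n →
      ammRun indici locked peso c lo hi = seqRun indici locked peso c (List.range' lo (hi - lo)) := by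
  induction n using Nat.strong_induction_on with
  | _ n ih =>
    intro lo hi c hn
    rw [ammRun]
    by_cases h1 : hi ≤ lo
    · rw [if_pos h1]
      have : hi - lo = 0 := by omega
      rw [this]; rfl
    · rw [if_neg h1]
      by_cases h2 : hi = lo + 1
      · rw [if_pos h2]
        have : hi - lo = 1 := by omega
        rw [this]
        simp only [List.range', seqRun]
      · rw [if_neg h2]
        have hlt : lo < hi := by omega
        have hmid1 : (lo + hi) / 2 - lo < n := by omega
        have hmid2 : hi - (lo + hi) / 2 < n := by omega
        rw [ih _ hmid1 lo ((lo + hi) / 2) c rfl,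
            show hi - lo = ((lo + hi) / 2 - lo) + (hi - (lo + hi) / 2) by omega]
        rw [← List.range'_append_1]
        rw [seqRun_append]
        have hsh : lo + ((lo + hi) / 2 - lo) = (lo + hi) / 2 := by omega
        rw [hsh]
        cases hres : seqRun indici locked peso c (List.range' lo ((lo + hi) / 2 - lo)) with
        | none => rfl
        | some c' =>
          simp only [Option.bind_some]
          exact ih _ hmid2 _ hi c' rfl

theorem ammLoopA_eq_seq (indici locked peso : List Int) (is : List Nat) (c : Int) :
    ammLoopA indici locked peso c is = (seqRun indici locked peso c is).isSome := by
  induction is generalizing c with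
  | nil => rfl
  | cons i rest ih =>
    simp only [ammLoopA, seqRun]
    generalize (if PySem.List.pyGetD locked (PySem.List.pyGetD indici (i : Int) 0 - 1) 0 == 1
        then c - PySem.List.pyGetD peso (PySem.List.pyGetD indici (i : Int) 0 - 1) 0 else c) = c2
    by_cases h : c2 ≤ 0
    · rw [if_pos h, if_neg (by omega)]
      rfl
    · rw [if_neg h, if_pos (by omega)]
      exact ih _

-- ===== VERDICT (by name: the statement is the Claim_ definition above) =====
theorem ammissibile_spec : Claim_equal_ammissibile := by
  intro indici locked peso C _ _
  unfold Spec_ammissibile ammissibile ammissibile_alt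
  rw [ammRun_eq_seq indici locked peso (locked.length - 0) 0 locked.length C rfl]
  rw [Nat.sub_zero, ← List.range_eq_range']
  exact ammLoopA_eq_seq indici locked peso (List.range locked.length) C
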